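-- pv_equiv track=rewrite | github.com/NIKIVLASTOS/PHYS4840 | nikiphoros_functions_lib.py | niki_argmin
-- ===== SOURCE A (Python) =====
-- def niki_argmin(*args):
--     # I used the same as above for the instance of having a list or tuple
--     if len(args) == 1 and isinstance(args[0], (list, tuple)):
--         args = args[0]  # makes the list/tuple into the arguments
--
--     if not args:
--         raise ValueError("At least one value is required")  # this pops up if there are no values entered when the function is called
--
--     min_value = None
--     min_index = None
--     first = True
--     index = 0
--
--     # this for loop will go through the values and find the index of the minimum
--     for value in args:
--
--         if first:
--             min_value = value
--             min_index = index
--             first = False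
--
--
--         if value < min_value:
--             min_value = value
--             min_index = index
--
--         if value > min_value:
--             pass
--
--         index += 1
--
--     return min_index
-- ===== SOURCE B (Python) =====
-- def niki_argmin(*args):
--     if len(args) == 1 and isinstance(args[0], (list, tuple)):
--         args = args[0]
--     if not args:
--         raise ValueError("At least one value is required")
--     m = min(args)
--     return args.index(m)
-- ===== Notes on version B (the rewrite author's own statement) =====
-- stated objective: simpler
-- what changed: Replaces the manual single-pass state-machine argmin loop (min_value/min_index/first/index bookkeeping) with two builtin passes: m = min(args) then args.index(m), which preserves first-occurrence tie-breaking.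
import Mathlib
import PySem

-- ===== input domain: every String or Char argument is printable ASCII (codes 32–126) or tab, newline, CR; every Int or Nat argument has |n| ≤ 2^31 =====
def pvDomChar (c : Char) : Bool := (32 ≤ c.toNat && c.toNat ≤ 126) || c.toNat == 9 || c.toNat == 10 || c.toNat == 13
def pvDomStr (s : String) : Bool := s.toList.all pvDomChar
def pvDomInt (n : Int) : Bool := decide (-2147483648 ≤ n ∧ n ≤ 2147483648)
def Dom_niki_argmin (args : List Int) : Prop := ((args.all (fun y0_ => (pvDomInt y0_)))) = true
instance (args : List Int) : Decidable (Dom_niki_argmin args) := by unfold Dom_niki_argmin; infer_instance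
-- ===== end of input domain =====

-- B replaces A's manual min_value/min_index/first/index loop by two builtin passes:
-- m = min(args); return args.index(m) (same first-occurrence tie-breaking); simpler, same cost.

-- ===== PORT A =====
-- state = (min_value, min_index, first, index), exactly A's four loop variables
def nikiStep (s : Option Int × Option Int × Bool × Int) (value : Int) :
    Option Int × Option Int × Bool × Int :=
  let mv := s.1; let mi := s.2.1; let first := s.2.2.1; let index := s.2.2.2
  let (mv, mi, first) := if first then (some value, some index, false) else (mv, mi, first)
  let (mv, mi) :=
    match mv with
    | some m => if value < m then (some value, some index) else (mv, mi)
    | none => (mv, mi)   -- unreachable: once the loop body runs, first has set mv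
  (mv, mi, first, index + 1)

def niki_argmin (args : List Int) : Int :=
  -- 'if not args: raise ValueError' — the empty list is excluded by Pre_niki_argmin
  ((args.foldl nikiStep (none, none, true, 0)).2.1).getD 0

-- ===== PORT B =====
def niki_argmin_alt (args : List Int) : Int :=
  match PySem.List.min? args (fun x => x) with
  | none => 0   -- empty: Python raises ValueError; excluded by Pre_niki_argmin
  | some m => ((PySem.List.index? args m).getD 0 : Nat)

-- ===== PRECONDITION & SPEC =====
-- Pre_ excludes only the empty list, on which A raises ValueError.
def Pre_niki_argmin (args : List Int) : Prop := args ≠ []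
instance (args : List Int) : Decidable (Pre_niki_argmin args) := by unfold Pre_niki_argmin; infer_instance
def pvWitness_niki_argmin : List Int := [3, 1, 2, 1]

def Spec_niki_argmin (args : List Int) (out : Int) : Prop := out = niki_argmin_alt args
instance (args : List Int) (out : Int) : Decidable (Spec_niki_argmin args out) := by unfold Spec_niki_argmin; infer_instance

-- ===== CLAIM (what is proved, stated in full; the proofs are below) =====
def Claim_equal_niki_argmin : Prop := ∀ (args : List Int), Dom_niki_argmin args → Pre_niki_argmin args → Spec_niki_argmin args (niki_argmin args)

-- ===== LEMMAS AND PROOFS =====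

-- Proof-only recursion mirroring A's loop once 'first' is false:
-- current min m (index i), current position idx.
def nikiIdx (t : List Int) (m i idx : Int) : Int :=
  match t with
  | [] => i
  | v :: t' => if v < m then nikiIdx t' v idx (idx + 1) else nikiIdx t' m i (idx + 1)

theorem nikiStep_false (m i idx : Int) (v : Int) :
    nikiStep (some m, some i, false, idx) v =
      if v < m then (some v, some idx, false, idx + 1) else (some m, some i, false, idx + 1) := by
  by_cases h : v < m <;> simp [nikiStep, h]

theorem foldl_nikiStep (t : List Int) (m i idx : Int) :
    ((t.foldl nikiStep (some m, some i, false, idx)).2.1) = some (nikiIdx t m i idx) := by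
  induction t generalizing m i idx with
  | nil => rfl
  | cons v t' ih =>
      rw [List.foldl_cons, nikiStep_false]
      by_cases h : v < m
      · rw [if_pos h, ih]; simp [nikiIdx, h]
      · rw [if_neg h, ih]; simp [nikiIdx, h]

theorem foldl_min_lt_mem (t : List Int) (m : Int) (h : t.foldl min m < m) :
    t.foldl min m ∈ t := by
  rcases PySem.List.foldl_min_mem t m with h' | h'
  · omega
  · exact h'

-- A's loop result vs the first index of the running minimum
theorem nikiIdx_eq (t : List Int) (m i idx : Int) :
    nikiIdx t m i idx =
      if t.foldl min m < m then
        idx + ((PySem.List.index? t (t.foldl min m)).getD 0 : Nat)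
      else i := by
  induction t generalizing m i idx with
  | nil => simp [nikiIdx]
  | cons v t' ih =>
      simp only [nikiIdx, List.foldl_cons]
      by_cases hv : v < m
      · have hmin : min m v = v := by omega
        rw [if_pos hv, ih, hmin]
        have hle := (PySem.List.foldl_min_le t' v).1
        by_cases h2 : t'.foldl min v < v
        · have hvne : v ≠ t'.foldl min v := by omega
          have hmem := foldl_min_lt_mem t' v h2
          obtain ⟨j, hj⟩ := Option.isSome_iff_exists.mp
            ((PySem.List.index?_isSome_iff t' (t'.foldl min v)).mpr hmem)
          rw [if_pos h2, if_pos (by omega), PySem.List.index?_cons_of_ne t' hvne, hj]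
          simp; omega
        · have hveq : t'.foldl min v = v := by omega
          rw [if_neg h2, if_pos (by omega), hveq, PySem.List.index?_cons_self]
          simp
      · have hmin : min m v = m := by omega
        rw [if_neg hv, ih, hmin]
        by_cases h2 : t'.foldl min m < m
        · have hvne : v ≠ t'.foldl min m := by omega
          have hmem := foldl_min_lt_mem t' m h2
          obtain ⟨j, hj⟩ := Option.isSome_iff_exists.mp
            ((PySem.List.index?_isSome_iff t' (t'.foldl min m)).mpr hmem)
          rw [if_pos h2, if_pos h2, PySem.List.index?_cons_of_ne t' hvne, hj]
          simp; omega
        · rw [if_neg h2, if_neg h2]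

-- ===== VERDICT (by name: the statement is the Claim_ definition above) =====
theorem niki_argmin_spec : Claim_equal_niki_argmin := by
  intro args _ hpre
  unfold Spec_niki_argmin niki_argmin niki_argmin_alt
  match args with
  | [] => exact absurd rfl hpre
  | a :: t =>
      rw [PySem.List.min?_id_cons]
      have hstep : nikiStep (none, none, true, 0) a = (some a, some 0, false, 1) := by
        simp [nikiStep]
      rw [List.foldl_cons, hstep, foldl_nikiStep, Option.getD_some, nikiIdx_eq]
      show (if List.foldl min a t < a then 1 + (((PySem.List.index? t (List.foldl min a t)).getD 0 : Nat) : Int) else 0)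
        = (((PySem.List.index? (a :: t) (List.foldl min a t)).getD 0 : Nat) : Int)
      have hle := (PySem.List.foldl_min_le t a).1
      by_cases h2 : t.foldl min a < a
      · have hane : a ≠ t.foldl min a := by omega
        have hmem := foldl_min_lt_mem t a h2
        obtain ⟨j, hj⟩ := Option.isSome_iff_exists.mp
          ((PySem.List.index?_isSome_iff t (t.foldl min a)).mpr hmem)
        rw [if_pos h2, PySem.List.index?_cons_of_ne t hane, hj]
        simp; omega
      · have haeq : t.foldl min a = a := by omega
        rw [if_neg h2, haeq, PySem.List.index?_cons_self]
        simp
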